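-- pv_equiv track=rewrite | github.com/irfanzq/netbox-automation-plugin | netbox_automation_plugin/workflows/maas_openstack_sync/reconciliation_apply_cells.py | _interface_audit_description
-- ===== SOURCE A (Python) =====
-- def _cell(cells: dict[str, str], *names: str) -> str:
--     for n in names:
--         for k, v in cells.items():
--             if str(k).strip().lower() == str(n).strip().lower():
--                 return "" if v is None else str(v).strip()
--     for n in names:
--         key_l = str(n).strip().lower()
--         for k, v in cells.items():
--             if str(k).strip().lower() == key_l:
--                 return "" if v is None else str(v).strip()
--     return ""
--
-- _DRIFT_AUDIT_MARKER = "\n=== Drift reconciliation (full row) ===\n"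
--
-- def _norm_header(k: str) -> str:
--     return str(k or "").strip().lower()
--
-- def _audit_residual_text(cells: dict[str, str], consumed_lower: set[str]) -> str:
--     """Text block for every audit column not mapped to typed NetBox fields on this object."""
--     lines: list[str] = []
--     for k, v in sorted(cells.items(), key=lambda x: _norm_header(str(x[0]))):
--         kn = _norm_header(str(k))
--         if kn in consumed_lower:
--             continue
--         vv = "" if v is None else str(v).strip()
--         if not vv or vv in ("—", "-"):
--             continue
--         lines.append(f"{k}: {vv}")
--     if not lines:
--         return ""
--     return _DRIFT_AUDIT_MARKER.strip() + "\n" + "\n".join(lines)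
--
-- def _interface_audit_description(cells: dict[str, str], consumed_lower: set[str]) -> str:
--     """Single description: headline NB/MAAS/proposed columns + full residual (no audit column omitted)."""
--     # Each tuple: display label first, then synonym header names to match in cells.
--     headline_specs: tuple[tuple[str, ...], ...] = (
--         ("Proposed properties", "Proposed properties (from MAAS)"),
--         ("Suggested NB name", "MAAS intf"),
--         ("Risk",),
--         ("Authority",),
--         ("Status",),
--         ("Proposed Action", "Proposed action"),
--         ("Suggested NB vrf", "NB proposed VRF", "NB VRF"),
--         ("NetBox site", "NB site"),
--         ("NB proposed tag", "NetBox tags", "Suggested NetBox tags"),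
--         ("NetBox actions", "Suggested NetBox actions", "NB proposed actions"),
--     )
--     consumed2 = set(consumed_lower)
--     headline: list[str] = []
--     for spec in headline_specs:
--         display = spec[0]
--         for n in spec:
--             consumed2.add(_norm_header(n))
--         v = _cell(cells, *spec)
--         if v:
--             headline.append(f"{display}: {v}")
--     residual = _audit_residual_text(cells, consumed2)
--     parts = [p for p in ("\n".join(headline), residual) if p]
--     out = "\n\n".join(parts).strip()
--     return out[:4096] if len(out) > 4096 else out
-- ===== SOURCE B (Python) =====
-- _DRIFT_AUDIT_MARKER = "\n=== Drift reconciliation (full row) ===\n"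
--
-- def _norm(k: str) -> str:
--     return str(k or "").strip().lower()
--
-- def _interface_audit_description(cells: dict[str, str], consumed_lower: set[str]) -> str:
--     """Single description: headline NB/MAAS/proposed columns + full residual (no audit column omitted)."""
--     headline_specs: tuple[tuple[str, ...], ...] = (
--         ("Proposed properties", "Proposed properties (from MAAS)"),
--         ("Suggested NB name", "MAAS intf"),
--         ("Risk",),
--         ("Authority",),
--         ("Status",),
--         ("Proposed Action", "Proposed action"),
--         ("Suggested NB vrf", "NB proposed VRF", "NB VRF"),
--         ("NetBox site", "NB site"),
--         ("NB proposed tag", "NetBox tags", "Suggested NetBox tags"),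
--         ("NetBox actions", "Suggested NetBox actions", "NB proposed actions"),
--     )
--     # One pass over cells: first-seen stripped value per normalized header.
--     index: dict[str, str] = {}
--     # Pre-normalized rows for the residual block, kept in original order for a stable sort.
--     rows: list[tuple[str, str, str]] = []
--     for k, v in cells.items():
--         kn = _norm(str(k))
--         vv = "" if v is None else str(v).strip()
--         if kn not in index:
--             index[kn] = vv
--         rows.append((kn, k, vv))
--
--     consumed = set(consumed_lower)
--     headline: list[str] = []
--     for spec in headline_specs:
--         consumed.update(_norm(n) for n in spec)
--         for n in spec:
--             hit = index.get(_norm(n))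
--             if hit is not None:
--                 if hit:
--                     headline.append(f"{spec[0]}: {hit}")
--                 break
--
--     lines = [f"{k}: {vv}" for kn, k, vv in sorted(rows, key=lambda t: t[0])
--              if kn not in consumed and vv and vv not in ("—", "-")]
--     residual = "" if not lines else _DRIFT_AUDIT_MARKER.strip() + "\n" + "\n".join(lines)
--
--     parts = [p for p in ("\n".join(headline), residual) if p]
--     out = "\n\n".join(parts).strip()
--     return out[:4096] if len(out) > 4096 else out
-- ===== Notes on version B (the rewrite author's own statement) =====
-- stated objective: faster
-- what changed: B replaces A's per-synonym nested scans over cells (run twice by _cell) with a first-seen index over normalized headers built in one pass plus pre-normalized rows reused for the residual, so each headline synonym becomes a single dict probe and values are stripped once.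
import Mathlib
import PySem

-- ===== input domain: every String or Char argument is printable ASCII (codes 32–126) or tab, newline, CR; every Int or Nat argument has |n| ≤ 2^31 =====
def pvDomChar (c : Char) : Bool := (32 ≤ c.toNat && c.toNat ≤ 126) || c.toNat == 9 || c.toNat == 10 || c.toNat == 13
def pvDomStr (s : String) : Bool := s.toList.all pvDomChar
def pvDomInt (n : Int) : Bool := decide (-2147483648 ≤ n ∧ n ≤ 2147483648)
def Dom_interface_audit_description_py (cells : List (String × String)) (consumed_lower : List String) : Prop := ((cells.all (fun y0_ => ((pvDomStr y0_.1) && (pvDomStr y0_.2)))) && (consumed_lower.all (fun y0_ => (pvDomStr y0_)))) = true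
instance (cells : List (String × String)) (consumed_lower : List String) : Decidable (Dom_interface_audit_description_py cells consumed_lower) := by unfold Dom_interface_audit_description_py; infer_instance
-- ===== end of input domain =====

-- B replaces A's repeated O(|cells|) scans per synonym with a first-seen index over
-- normalized headers built in one pass, and computes the residual by filter/map over
-- pre-normalized rows instead of re-normalizing inside an append loop (objective: faster,
-- constant-factor: each headline lookup becomes a dict probe).

-- shared by both ports: _norm_header / str(k).strip().lower()
def pvNorm (k : String) : String := PySem.Str.lower (PySem.Str.strip k)

-- the headline specs tuple (display label first, then synonyms)
def pvSpecs : List (List String) :=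
  [ ["Proposed properties", "Proposed properties (from MAAS)"],
    ["Suggested NB name", "MAAS intf"],
    ["Risk"],
    ["Authority"],
    ["Status"],
    ["Proposed Action", "Proposed action"],
    ["Suggested NB vrf", "NB proposed VRF", "NB VRF"],
    ["NetBox site", "NB site"],
    ["NB proposed tag", "NetBox tags", "Suggested NetBox tags"],
    ["NetBox actions", "Suggested NetBox actions", "NB proposed actions"] ]

-- ===== PORT A =====
-- inner scan of _cell: first cell whose normalized key equals keyl, stripped value
def pvScanA (keyl : String) : List (String × String) → Option String
  | [] => none
  | kv :: rest => if pvNorm kv.1 == keyl then some (PySem.Str.strip kv.2) else pvScanA keyl rest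

-- first pass of _cell over the synonym names
def pvCellPass1 (cells : List (String × String)) : List String → Option String
  | [] => none
  | n :: rest =>
    match pvScanA (pvNorm n) cells with
    | some r => some r
    | none => pvCellPass1 cells rest

-- second (textually duplicated) pass of _cell
def pvCellPass2 (cells : List (String × String)) : List String → Option String
  | [] => none
  | n :: rest =>
    match pvScanA (pvNorm n) cells with
    | some r => some r
    | none => pvCellPass2 cells rest

def pvCellA (cells : List (String × String)) (names : List String) : String :=
  match pvCellPass1 cells names with
  | some r => r
  | none =>
    match pvCellPass2 cells names with
    | some r => r
    | none => ""

-- _audit_residual_text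
def pvResidualA (cells : List (String × String)) (consumed : List String) : String :=
  let sortedItems := PySem.List.sorted cells (fun kv => pvNorm kv.1) false
  let lines := sortedItems.foldl (fun acc kv =>
    let kn := pvNorm kv.1
    if consumed.contains kn then acc
    else
      let vv := PySem.Str.strip kv.2
      if vv == "" || vv == "—" || vv == "-" then acc
      else acc ++ [kv.1 ++ ": " ++ vv]) []
  if lines == [] then ""
  else PySem.Str.strip "\n=== Drift reconciliation (full row) ===\n" ++ "\n" ++ PySem.Str.join "\n" lines

def interface_audit_description_py (cells : List (String × String)) (consumed_lower : List String) : String :=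
  let st := pvSpecs.foldl (fun st spec =>
    let c := spec.foldl (fun c n => PySem.Set.add c (pvNorm n)) st.1
    let v := pvCellA cells spec
    (c, if v != "" then st.2 ++ [spec.headD "" ++ ": " ++ v] else st.2))
    ((PySem.Set.ofList consumed_lower : PySem.Set String), ([] : List String))
  let residual := pvResidualA cells st.1
  let hj := PySem.Str.join "\n" st.2
  let parts := (if hj != "" then [hj] else []) ++ (if residual != "" then [residual] else [])
  let out := PySem.Str.strip (PySem.Str.join "\n\n" parts)
  if PySem.Str.len out > 4096 then PySem.Str.slice out none (some 4096) else out

-- ===== PORT B =====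
-- one pass over cells: first-seen index per normalized header, plus pre-normalized rows
def pvIndexRowsB (cells : List (String × String)) :
    PySem.Dict String String × List (String × String × String) :=
  cells.foldl (fun st kv =>
    let kn := pvNorm kv.1
    let vv := PySem.Str.strip kv.2
    ((if st.1.contains kn then st.1 else st.1.insert kn vv), st.2 ++ [(kn, kv.1, vv)]))
    (PySem.Dict.empty, [])

-- first synonym present in the index (the loop with break)
def pvHitB (idx : PySem.Dict String String) : List String → Option String
  | [] => none
  | n :: rest =>
    match idx.get? (pvNorm n) with
    | some v => some v
    | none => pvHitB idx rest

def interface_audit_description_py_alt (cells : List (String × String)) (consumed_lower : List String) : String :=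
  let ir := pvIndexRowsB cells
  let st := pvSpecs.foldl (fun st spec =>
    let c := PySem.Set.update st.1 (spec.map pvNorm)
    (c, match pvHitB ir.1 spec with
        | some hit => if hit != "" then st.2 ++ [spec.headD "" ++ ": " ++ hit] else st.2
        | none => st.2))
    ((PySem.Set.ofList consumed_lower : PySem.Set String), ([] : List String))
  let lines := ((PySem.List.sorted ir.2 (fun t => t.1) false).filter
      (fun t => !(st.1.contains t.1) && !(t.2.2 == "" || t.2.2 == "—" || t.2.2 == "-"))).map
      (fun t => t.2.1 ++ ": " ++ t.2.2)
  let residual :=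
    if lines == [] then ""
    else PySem.Str.strip "\n=== Drift reconciliation (full row) ===\n" ++ "\n" ++ PySem.Str.join "\n" lines
  let hj := PySem.Str.join "\n" st.2
  let parts := (if hj != "" then [hj] else []) ++ (if residual != "" then [residual] else [])
  let out := PySem.Str.strip (PySem.Str.join "\n\n" parts)
  if PySem.Str.len out > 4096 then PySem.Str.slice out none (some 4096) else out

-- ===== PRECONDITION & SPEC =====
def Spec_interface_audit_description_py (cells : List (String × String)) (consumed_lower : List String) (out : String) : Prop := out = interface_audit_description_py_alt cells consumed_lower
instance (cells : List (String × String)) (consumed_lower : List String) (out : String) : Decidable (Spec_interface_audit_description_py cells consumed_lower out) := by unfold Spec_interface_audit_description_py; infer_instance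

-- ===== CLAIM (what is proved, stated in full; the proofs are below) =====
def Claim_equal_interface_audit_description_py : Prop := ∀ (cells : List (String × String)) (consumed_lower : List String), Dom_interface_audit_description_py cells consumed_lower → Spec_interface_audit_description_py cells consumed_lower (interface_audit_description_py cells consumed_lower)

-- ===== LEMMAS AND PROOFS =====

-- the index component of B's one-pass loop, with an arbitrary starting dict
theorem pvIndexB_get (cells : List (String × String)) (d : PySem.Dict String String) (kn : String) :
    (cells.foldl (fun d kv =>
      if d.contains (pvNorm kv.1) then d else d.insert (pvNorm kv.1) (PySem.Str.strip kv.2)) d).get? kn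
    = (d.get? kn).or (pvScanA kn cells) := by
  induction cells generalizing d with
  | nil => simp [pvScanA]
  | cons kv rest ih =>
    simp only [List.foldl_cons, pvScanA]
    by_cases hc : d.contains (pvNorm kv.1)
    · rw [if_pos hc, ih]
      by_cases hk : pvNorm kv.1 = kn
      · subst hk
        rw [PySem.Dict.contains_eq_isSome_get?] at hc
        cases hd : d.get? (pvNorm kv.1) with
        | none => rw [hd] at hc; simp at hc
        | some w => simp
      · simp [hk]
    · rw [if_neg hc, ih]
      by_cases hk : pvNorm kv.1 = kn
      · subst hk
        rw [PySem.Dict.contains_eq_isSome_get?] at hc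
        cases hd : d.get? (pvNorm kv.1) with
        | none => simp [PySem.Dict.get?_insert_self]
        | some w => rw [hd] at hc; simp at hc
      · rw [PySem.Dict.get?_insert_of_ne _ _ (fun h => hk h.symm)]
        simp [hk]

theorem pvIndexRowsB_eq (cells : List (String × String)) :
    pvIndexRowsB cells =
      (cells.foldl (fun d kv =>
        if d.contains (pvNorm kv.1) then d else d.insert (pvNorm kv.1) (PySem.Str.strip kv.2)) PySem.Dict.empty,
       cells.map (fun kv => (pvNorm kv.1, kv.1, PySem.Str.strip kv.2))) := by
  unfold pvIndexRowsB
  have h := PySem.List.foldl_prod_mk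
    (f := fun d (kv : String × String) => if PySem.Dict.contains d (pvNorm kv.1) then d else PySem.Dict.insert d (pvNorm kv.1) (PySem.Str.strip kv.2))
    (g := fun (rows : List (String × String × String)) (kv : String × String) => rows ++ [(pvNorm kv.1, kv.1, PySem.Str.strip kv.2)])
    (l := cells) (a := PySem.Dict.empty) (b := [])
  simp only [PySem.List.foldl_append_singleton_eq_map, List.nil_append] at h
  exact h

theorem pvHitB_eq_pass1 (cells : List (String × String)) (names : List String) :
    pvHitB (pvIndexRowsB cells).1 names = pvCellPass1 cells names := by
  induction names with
  | nil => rfl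
  | cons n rest ih =>
    simp only [pvHitB, pvCellPass1, pvIndexRowsB_eq, pvIndexB_get, PySem.Dict.get?_empty,
      Option.none_or] at *
    rw [ih]

theorem pvCellPass2_eq_pass1 : pvCellPass2 = pvCellPass1 := by
  funext cells names
  induction names with
  | nil => rfl
  | cons n rest ih => simp only [pvCellPass1, pvCellPass2] at *; rw [ih]

theorem pvCellA_eq_hit (cells : List (String × String)) (names : List String) :
    pvCellA cells names = (pvHitB (pvIndexRowsB cells).1 names).getD "" := by
  rw [pvHitB_eq_pass1]
  unfold pvCellA
  rw [pvCellPass2_eq_pass1]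
  cases pvCellPass1 cells names <;> rfl

-- insertion sort commutes with mapping when the key factors through the map
theorem insertBy_map {α β κ : Type} [LT κ] [DecidableLT κ] (f : α → β)
    (keyA : α → κ) (keyB : β → κ) (hk : ∀ a, keyB (f a) = keyA a)
    (x : α) (acc : List α) :
    PySem.List.insertBy (fun a b => decide (keyB a < keyB b)) (f x) (acc.map f)
      = (PySem.List.insertBy (fun a b => decide (keyA a < keyA b)) x acc).map f := by
  induction acc with
  | nil => rfl
  | cons y rest ih =>
    simp only [List.map_cons, PySem.List.insertBy, hk]
    by_cases h : keyA x < keyA y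
    · simp [h]
    · simp [h, ih]

theorem sorted_map_key {α β κ : Type} [LT κ] [DecidableLT κ] (l : List α) (f : α → β)
    (keyA : α → κ) (keyB : β → κ) (hk : ∀ a, keyB (f a) = keyA a) :
    PySem.List.sorted (l.map f) keyB false = (PySem.List.sorted l keyA false).map f := by
  rw [PySem.List.sorted_eq_foldl_insertBy, PySem.List.sorted_eq_foldl_insertBy]
  suffices h : ∀ acc : List α,
      (l.map f).foldl (fun acc x => PySem.List.insertBy (fun a b => decide (keyB a < keyB b)) x acc) (acc.map f)
        = (l.foldl (fun acc x => PySem.List.insertBy (fun a b => decide (keyA a < keyA b)) x acc) acc).map f by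
    simpa using h []
  induction l with
  | nil => intro acc; rfl
  | cons x rest ih =>
    intro acc
    simp only [List.map_cons, List.foldl_cons]
    rw [insertBy_map f keyA keyB hk, ih]

-- the headline/consumed fold of the two ports computes the same state
theorem headline_fold_eq (cells : List (String × String)) (init : PySem.Set String × List String) :
    pvSpecs.foldl (fun st spec =>
      let c := spec.foldl (fun c n => PySem.Set.add c (pvNorm n)) st.1
      let v := pvCellA cells spec
      (c, if v != "" then st.2 ++ [spec.headD "" ++ ": " ++ v] else st.2)) init
    = pvSpecs.foldl (fun st spec =>
      let c := PySem.Set.update st.1 (spec.map pvNorm)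
      (c, match pvHitB (pvIndexRowsB cells).1 spec with
          | some hit => if hit != "" then st.2 ++ [spec.headD "" ++ ": " ++ hit] else st.2
          | none => st.2)) init := by
  apply PySem.List.foldl_congr_mem
  intro st spec _
  have hc : spec.foldl (fun c n => PySem.Set.add c (pvNorm n)) st.1
      = PySem.Set.update st.1 (spec.map pvNorm) := by
    simp [PySem.Set.update, List.foldl_map]
  rw [pvCellA_eq_hit]
  cases h : pvHitB (pvIndexRowsB cells).1 spec with
  | none => simp [hc]
  | some hit => simp [hc]

-- the residual-lines computations agree
theorem lines_eq (cells : List (String × String)) (consumed : List String) :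
    (PySem.List.sorted cells (fun kv => pvNorm kv.1) false).foldl (fun acc kv =>
      let kn := pvNorm kv.1
      if consumed.contains kn then acc
      else
        let vv := PySem.Str.strip kv.2
        if vv == "" || vv == "—" || vv == "-" then acc
        else acc ++ [kv.1 ++ ": " ++ vv]) []
    = ((PySem.List.sorted (cells.map (fun kv => (pvNorm kv.1, kv.1, PySem.Str.strip kv.2)))
          (fun t => t.1) false).filter
        (fun t => !(consumed.contains t.1) && !(t.2.2 == "" || t.2.2 == "—" || t.2.2 == "-"))).map
        (fun t => t.2.1 ++ ": " ++ t.2.2) := by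
  rw [sorted_map_key cells (fun kv => (pvNorm kv.1, kv.1, PySem.Str.strip kv.2))
      (fun kv => pvNorm kv.1) (fun t => t.1) (fun a => rfl)]
  rw [List.filter_map, List.map_map]
  have hstep : ∀ (acc : List String) (kv : String × String),
      (let kn := pvNorm kv.1
       if consumed.contains kn then acc
       else
         let vv := PySem.Str.strip kv.2
         if vv == "" || vv == "—" || vv == "-" then acc
         else acc ++ [kv.1 ++ ": " ++ vv])
      = if ((fun t : String × String × String =>
              !(consumed.contains t.1) && !(t.2.2 == "" || t.2.2 == "—" || t.2.2 == "-")) ∘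
            (fun kv : String × String => (pvNorm kv.1, kv.1, PySem.Str.strip kv.2))) kv
        then acc ++ [kv.1 ++ ": " ++ PySem.Str.strip kv.2] else acc := by
    intro acc kv
    simp only [Function.comp]
    by_cases h1 : pvNorm kv.1 ∈ consumed
    · simp [h1]
    · by_cases h2 : PySem.Str.strip kv.2 = "" ∨ PySem.Str.strip kv.2 = "—" ∨ PySem.Str.strip kv.2 = "-"
      · rcases h2 with h2 | h2 | h2 <;> simp [h1, h2]
      · push Not at h2
        simp [h1, h2.1, h2.2.1, h2.2.2]
  calc (PySem.List.sorted cells (fun kv => pvNorm kv.1) false).foldl (fun acc kv =>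
        let kn := pvNorm kv.1
        if consumed.contains kn then acc
        else
          let vv := PySem.Str.strip kv.2
          if vv == "" || vv == "—" || vv == "-" then acc
          else acc ++ [kv.1 ++ ": " ++ vv]) []
      = (PySem.List.sorted cells (fun kv => pvNorm kv.1) false).foldl (fun acc kv =>
          if ((fun t : String × String × String =>
              !(consumed.contains t.1) && !(t.2.2 == "" || t.2.2 == "—" || t.2.2 == "-")) ∘
            (fun kv : String × String => (pvNorm kv.1, kv.1, PySem.Str.strip kv.2))) kv
          then acc ++ [kv.1 ++ ": " ++ PySem.Str.strip kv.2] else acc) [] := by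
        exact PySem.List.foldl_congr_mem _ _ _ _ (fun acc kv _ => hstep acc kv)
    _ = _ := by
        rw [PySem.List.foldl_append_if
          (p := ((fun t : String × String × String =>
              !(consumed.contains t.1) && !(t.2.2 == "" || t.2.2 == "—" || t.2.2 == "-")) ∘
            (fun kv : String × String => (pvNorm kv.1, kv.1, PySem.Str.strip kv.2))))
          (f := fun kv : String × String => kv.1 ++ ": " ++ PySem.Str.strip kv.2)]
        simp [Function.comp]

-- ===== VERDICT (by name: the statement is the Claim_ definition above) =====
theorem interface_audit_description_py_spec : Claim_equal_interface_audit_description_py := by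
  intro cells consumed_lower _
  unfold Spec_interface_audit_description_py
  simp only [interface_audit_description_py, interface_audit_description_py_alt,
    headline_fold_eq, pvIndexRowsB_eq, pvResidualA, lines_eq, PySem.Set.contains, List.contains]
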